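-- pv_equiv track=rewrite | github.com/monistdavid/human-books | technology and idea/chatbot evolution/chat_aws_4.py | history_process
-- ===== SOURCE A (Python) =====
-- def history_process(hp_history):
--     list_history = []
--     tmp_history = {}
--     input_turn = True
--     for h in hp_history:
--         if input_turn:
--             tmp_history["input"] = h
--         else:
--             tmp_history["response"] = h
--         if len(tmp_history) == 2:
--             list_history.append(tmp_history)
--             tmp_history = {}
--         input_turn = not input_turn
--     return list_history
-- ===== SOURCE B (Python) =====
-- def history_process(hp_history):
--     it = iter(hp_history)
--     return [{"input": a, "response": b} for a, b in zip(it, it)]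
-- ===== Notes on version B (the rewrite author's own statement) =====
-- stated objective: idiomatic
-- what changed: Replaces the toggle flag, branch, and accumulator dict with a single comprehension that pairs adjacent elements via zip over one iterator, which also silently drops an unpaired trailing item exactly as A does.
import Mathlib
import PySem

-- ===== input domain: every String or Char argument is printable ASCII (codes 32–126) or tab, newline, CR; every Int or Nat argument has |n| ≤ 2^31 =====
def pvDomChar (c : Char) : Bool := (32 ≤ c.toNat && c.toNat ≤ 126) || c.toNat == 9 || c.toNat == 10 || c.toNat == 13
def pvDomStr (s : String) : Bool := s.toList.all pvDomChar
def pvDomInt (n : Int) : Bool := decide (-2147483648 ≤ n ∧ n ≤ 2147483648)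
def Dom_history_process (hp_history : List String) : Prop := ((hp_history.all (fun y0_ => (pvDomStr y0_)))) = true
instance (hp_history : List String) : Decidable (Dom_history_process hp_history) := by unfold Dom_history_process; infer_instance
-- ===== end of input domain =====

-- B pairs adjacent history items with zip over one iterator instead of A's toggle-flag accumulator (idiomatic; same O(n) cost).
-- ===== PORT A =====
def history_process (hp_history : List String) : List (List (String × String)) :=
  (hp_history.foldl
    (fun (st : List (List (String × String)) × PySem.Dict String String × Bool) h =>
      let tmp := if st.2.2 then st.2.1.insert "input" h else st.2.1.insert "response" h
      if PySem.Dict.size tmp = 2 then (st.1 ++ [tmp.items], PySem.Dict.empty, !st.2.2)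
      else (st.1, tmp, !st.2.2))
    ([], PySem.Dict.empty, true)).1

-- ===== PORT B =====
def history_process_alt (hp_history : List String) : List (List (String × String)) :=
  match hp_history with
  | a :: b :: t => [("input", a), ("response", b)] :: history_process_alt t
  | _ => []

-- ===== PRECONDITION & SPEC =====
def Spec_history_process (hp_history : List String) (out : List (List (String × String))) : Prop := out = history_process_alt hp_history
instance (hp_history : List String) (out : List (List (String × String))) : Decidable (Spec_history_process hp_history out) := by unfold Spec_history_process; infer_instance

-- ===== CLAIM (what is proved, stated in full; the proofs are below) =====
def Claim_equal_history_process : Prop := ∀ (hp_history : List String), Dom_history_process hp_history → Spec_history_process hp_history (history_process hp_history)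

-- ===== LEMMAS AND PROOFS =====
theorem hp_loop_eq : ∀ (l : List String) (acc : List (List (String × String))),
    (l.foldl
      (fun (st : List (List (String × String)) × PySem.Dict String String × Bool) h =>
        let tmp := if st.2.2 then st.2.1.insert "input" h else st.2.1.insert "response" h
        if PySem.Dict.size tmp = 2 then (st.1 ++ [tmp.items], PySem.Dict.empty, !st.2.2)
        else (st.1, tmp, !st.2.2))
      (acc, PySem.Dict.empty, true)).1 = acc ++ history_process_alt l
  | [], acc => by simp [history_process_alt]
  | [a], acc => by
      simp [List.foldl, history_process_alt, PySem.Dict.insert, PySem.Dict.empty,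
        PySem.Dict.contains, PySem.Dict.size]
  | a :: b :: t, acc => by
      simp only [List.foldl, history_process_alt]
      have hs1 : ((PySem.Dict.empty : PySem.Dict String String).insert "input" a).size = 1 := rfl
      have h1 : ((PySem.Dict.empty : PySem.Dict String String).insert "input" a).insert
          "response" b = PySem.Dict.mk [("input", a), ("response", b)] := by
        simp [PySem.Dict.insert, PySem.Dict.empty, PySem.Dict.contains]
      have h2 : (PySem.Dict.mk [("input", a), ("response", b)]).size = 2 := rfl
      simp [hs1, h1, h2, hp_loop_eq t]

-- ===== VERDICT (by name: the statement is the Claim_ definition above) =====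
theorem history_process_spec : Claim_equal_history_process := by
  intro hp _
  show history_process hp = history_process_alt hp
  have := hp_loop_eq hp []
  simpa [history_process] using this
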